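-- pv_equiv track=rewrite | github.com/ElyesseAdda/WebAppli | Desktop/Projet/P3000/Application/api/views_drive/manager.py | normalize_path_segments
-- ===== SOURCE A (Python) =====
-- def normalize_filename(filename: str) -> str:
--     """
--     Normalise un nom de fichier ou dossier en remplaçant les espaces par des underscores
--
--     RÈGLE : Remplacer UNIQUEMENT les espaces par des underscores
--     AWS S3 accepte tous les caractères spéciaux SAUF les espaces
--
--     Args:
--         filename: Nom du fichier/dossier à normaliser
--
--     Returns:
--         Nom normalisé
--     """
--     if not filename:
--         return filename
--
--     # Remplacer UNIQUEMENT les espaces par des underscores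
--     # Tous les autres caractères spéciaux (&, @, #, etc.) sont autorisés par AWS S3
--     normalized = filename.replace(' ', '_')
--     # Spécifique: encoder le slash '/' pour éviter la création de sous-dossiers
--     # Utiliser le caractère '∕' (U+2215) visuellement proche et sûr pour les clés S3
--     normalized = normalized.replace('/', '∕')
--
--     return normalized
--
-- def normalize_path_segments(path: str) -> str:
--     """
--     Normalise tous les segments d'un chemin (dossiers et fichiers)
--
--     Args:
--         path: Chemin à normaliser (ex: "dossier parent/fichier avec espaces.pdf")
--
--     Returns:
--         Chemin normalisé (ex: "dossier_parent/fichier_avec_espaces.pdf")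
--     """
--     if not path:
--         return path
--
--     # Séparer le chemin en segments
--     segments = path.split('/')
--
--     # Normaliser chaque segment (sauf le dernier s'il contient une extension)
--     normalized_segments = []
--     for i, segment in enumerate(segments):
--         if segment:
--             # Normaliser le segment
--             normalized_segments.append(normalize_filename(segment))
--         else:
--             # Garder les slashes vides (pour les chemins absolus)
--             normalized_segments.append('')
--
--     # Rejoindre les segments
--     return '/'.join(normalized_segments)
-- ===== SOURCE B (Python) =====
-- def normalize_path_segments(path: str) -> str:
--     # Splitting on the slash leaves no slash inside any segment, so the
--     # slash-encoding branch of normalize_filename never fires; rejoining the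
--     # underscore-substituted segments is one global replacement on the string.
--     return path.replace(' ', '_')
-- ===== Notes on version B (the rewrite author's own statement) =====
-- stated objective: simpler
-- what changed: Replaced the split-on-slash / per-segment normalize_filename loop / rejoin pipeline by a single whole-string space-to-underscore replacement, since splitting guarantees the per-segment slash-encoding branch is dead.
import Mathlib
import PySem

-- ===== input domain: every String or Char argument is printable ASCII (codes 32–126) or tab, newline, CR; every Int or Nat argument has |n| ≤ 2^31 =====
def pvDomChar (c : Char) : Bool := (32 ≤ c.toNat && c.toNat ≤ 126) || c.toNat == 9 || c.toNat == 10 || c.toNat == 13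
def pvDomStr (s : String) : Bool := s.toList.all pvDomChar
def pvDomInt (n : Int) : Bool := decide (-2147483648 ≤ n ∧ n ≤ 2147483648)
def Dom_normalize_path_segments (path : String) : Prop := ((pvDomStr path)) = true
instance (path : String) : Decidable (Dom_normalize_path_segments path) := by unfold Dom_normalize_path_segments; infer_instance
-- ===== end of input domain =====

-- B replaces A's split-on-slash / per-segment-normalize / rejoin pipeline by one whole-string
-- space-to-underscore replacement: the per-segment slash-encoding branch is dead after splitting.


-- ===== PORT A =====
-- helper normalize_filename: guard, then the two replacements (space→underscore, slash→division slash)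
def pvNormalizeFilename (filename : String) : String :=
  if filename = "" then filename
  else
    let normalized := PySem.Str.replace filename " " "_"
    let normalized := PySem.Str.replace normalized "/" "∕"
    normalized

def normalize_path_segments (path : String) : String :=
  if path = "" then path
  else
    -- path split on the slash: separator nonempty, exact via PySem.Chars.splitOn
    let segments : List String := (PySem.Chars.splitOn path.toList "/".toList).map String.ofList
    -- for i, segment in enumerate(segments): the index i is unused, so the fold runs over the segments
    let normalized_segments : List String :=
      segments.foldl
        (fun acc segment =>
          if segment ≠ "" then acc ++ [pvNormalizeFilename segment] else acc ++ [""]) []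
    PySem.Str.join "/" normalized_segments

-- ===== PORT B =====
def normalize_path_segments_alt (path : String) : String :=
  PySem.Str.replace path " " "_"

-- ===== PRECONDITION & SPEC =====
def Spec_normalize_path_segments (path : String) (out : String) : Prop := out = normalize_path_segments_alt path
instance (path : String) (out : String) : Decidable (Spec_normalize_path_segments path out) := by unfold Spec_normalize_path_segments; infer_instance

-- ===== CLAIM (what is proved, stated in full; the proofs are below) =====
def Claim_equal_normalize_path_segments : Prop := ∀ (path : String), Dom_normalize_path_segments path → Spec_normalize_path_segments path (normalize_path_segments path)

-- ===== LEMMAS AND PROOFS =====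

-- characterization of PySem.Chars.replace for a single-character pattern
theorem repl_go_eq (c0 r : Char) : ∀ (fuel : Nat) (l acc : List Char), l.length ≤ fuel →
    PySem.Chars.replace.go [c0] [r] fuel l acc
      = acc.reverse ++ l.map (fun c => if c = c0 then r else c)
  | 0, l, acc, h => by
    have : l = [] := List.eq_nil_of_length_eq_zero (Nat.le_zero.mp h)
    subst this; simp [PySem.Chars.replace.go]
  | fuel+1, [], acc, h => by simp [PySem.Chars.replace.go]
  | fuel+1, c :: t, acc, h => by
    by_cases hc : c = c0
    · subst hc
      simp only [PySem.Chars.replace.go, List.isPrefixOf, BEq.rfl, Bool.and_true, if_true,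
        List.length_cons, List.length_nil, List.drop_succ_cons, List.drop_zero, List.reverse_cons,
        List.reverse_nil, List.nil_append]
      rw [repl_go_eq c r fuel t ([r] ++ acc) (by simpa using h)]
      simp
    · have hb : (c0 == c) = false := by simpa using fun e => hc e.symm
      simp only [PySem.Chars.replace.go, List.isPrefixOf, hb, Bool.false_and, Bool.false_eq_true,
        if_false]
      rw [repl_go_eq c0 r fuel t (c :: acc) (by simpa using Nat.le_of_succ_le_succ h)]
      simp [hc]

theorem repl_single (c0 r : Char) (l : List Char) :
    PySem.Chars.replace l [c0] [r] = l.map (fun c => if c = c0 then r else c) := by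
  simp [PySem.Chars.replace, repl_go_eq c0 r l.length l [] le_rfl]

-- the value of Python's split on a single-character separator
def splitC (c0 : Char) : List Char → List (List Char)
  | [] => [[]]
  | c :: t =>
    if c = c0 then [] :: splitC c0 t
    else
      match splitC c0 t with
      | [] => [[c]]
      | s :: ss => (c :: s) :: ss

theorem splitC_ne_nil (c0 : Char) (l : List Char) : splitC c0 l ≠ [] := by
  induction l with
  | nil => simp [splitC]
  | cons c t ih =>
    simp only [splitC]
    split_ifs
    · simp
    · cases h : splitC c0 t <;> simp

theorem split_go_eq (c0 : Char) : ∀ (fuel : Nat) (l cur : List Char) (acc : List (List Char)), l.length ≤ fuel →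
    PySem.Chars.splitOn.go [c0] fuel l cur acc
      = acc.reverse ++ (splitC c0 l).modifyHead (cur.reverse ++ ·)
  | 0, l, cur, acc, h => by
    have : l = [] := List.eq_nil_of_length_eq_zero (Nat.le_zero.mp h)
    subst this; simp [PySem.Chars.splitOn.go, splitC]
  | fuel+1, [], cur, acc, h => by simp [PySem.Chars.splitOn.go, splitC]
  | fuel+1, c :: t, cur, acc, h => by
    by_cases hc : c = c0
    · subst hc
      simp only [PySem.Chars.splitOn.go, List.isPrefixOf, BEq.rfl, Bool.and_true, if_true,
        List.length_cons, List.length_nil, List.drop_succ_cons, List.drop_zero, List.reverse_cons,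
        List.reverse_nil, List.nil_append]
      rw [split_go_eq c fuel t [] (cur.reverse :: acc) (by simpa using h)]
      simp only [splitC, if_pos rfl, List.modifyHead_cons, List.reverse_cons, List.append_assoc,
        List.nil_append, List.append_nil, List.singleton_append]
      have hid : (fun x : List Char => [].reverse ++ x) = id := by funext x; simp
      rw [hid, List.modifyHead_id, id]
      simp
    · have hb : (c0 == c) = false := by simpa using fun e => hc e.symm
      simp only [PySem.Chars.splitOn.go, List.isPrefixOf, hb, Bool.false_and, Bool.false_eq_true,
        if_false]
      rw [split_go_eq c0 fuel t (c :: cur) acc (by simpa using Nat.le_of_succ_le_succ h)]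
      simp only [splitC, if_neg hc]
      cases h' : splitC c0 t with
      | nil => exact absurd h' (splitC_ne_nil c0 t)
      | cons s ss => simp

theorem splitOn_single (c0 : Char) (l : List Char) :
    PySem.Chars.splitOn l [c0] = splitC c0 l := by
  rw [PySem.Chars.splitOn, split_go_eq c0 (l.length+1) l [] [] (Nat.le_succ _)]
  cases h : splitC c0 l with
  | nil => exact absurd h (splitC_ne_nil c0 l)
  | cons s ss => simp [h]

theorem inter_single (s x : List Char) : s.intercalate [x] = x := by simp [List.intercalate]

theorem inter_cons2 (s x y : List Char) (ys : List (List Char)) :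
    s.intercalate (x :: y :: ys) = x ++ s ++ s.intercalate (y :: ys) := by
  simp [List.intercalate, List.intersperse]

theorem not_mem_splitC (c0 : Char) (l : List Char) :
    ∀ s ∈ splitC c0 l, c0 ∉ s := by
  induction l with
  | nil => simp [splitC]
  | cons c t ih =>
    simp only [splitC]
    split_ifs with hc
    · intro s hs
      simp only [List.mem_cons] at hs
      rcases hs with hs | hs
      · simp [hs]
      · exact ih s hs
    · cases h' : splitC c0 t with
      | nil => exact absurd h' (splitC_ne_nil c0 t)
      | cons s ss =>
        intro x hx
        simp only [List.mem_cons] at hx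
        rcases hx with hx | hx
        · subst hx
          simp only [List.mem_cons, not_or]
          refine ⟨fun e => hc e.symm, ?_⟩
          exact ih s (h' ▸ List.mem_cons_self ..)
        · exact ih x (h' ▸ List.mem_cons_of_mem s hx)

-- joining f-mapped segments back with the separator is a whole-string map, when f fixes the separator
theorem join_map_splitC (c0 : Char) (f : Char → Char) (hf : f c0 = c0) (l : List Char) :
    PySem.Chars.join [c0] ((splitC c0 l).map (List.map f)) = l.map f := by
  induction l with
  | nil => simp [splitC, PySem.Chars.join, inter_single]
  | cons c t ih =>
    simp only [splitC]
    split_ifs with hc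
    · subst hc
      simp only [List.map_cons, List.map_nil, PySem.Chars.join] at ih ⊢
      cases h' : (splitC c t).map (List.map f) with
      | nil => exact absurd (List.map_eq_nil_iff.mp h') (splitC_ne_nil c t)
      | cons s ss =>
        rw [h'] at ih
        rw [inter_cons2, ← ih, hf]
        simp
    · cases h' : splitC c0 t with
      | nil => exact absurd h' (splitC_ne_nil c0 t)
      | cons s ss =>
        rw [h'] at ih
        simp only [List.map_cons, PySem.Chars.join] at ih ⊢
        cases ss with
        | nil => simp only [List.map_nil, inter_single] at ih ⊢; simp [ih]
        | cons s2 ss2 =>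
          simp only [List.map_cons] at ih ⊢
          rw [inter_cons2] at ih ⊢
          rw [← ih]
          simp

-- the fold in A just maps the per-segment function over the segments
theorem foldl_app_map (g : String → String) : ∀ (xs : List String) (init : List String),
    xs.foldl (fun acc x => if x ≠ "" then acc ++ [g x] else acc ++ [""]) init
      = init ++ xs.map (fun x => if x ≠ "" then g x else "")
  | [], init => by simp
  | x :: xs, init => by
    simp only [List.foldl_cons, List.map_cons]
    rw [foldl_app_map g xs]
    split_ifs <;> simp

theorem ofList_eq_empty_iff (l : List Char) : String.ofList l = "" ↔ l = [] := by
  constructor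
  · intro h
    have := congrArg String.toList h
    simpa using this
  · intro h; subst h; rfl

-- per segment: A's normalize_filename is just the space substitution (the slash branch is dead)
theorem seg_value (s : List Char) (hs : '/' ∉ s) :
    (if String.ofList s ≠ "" then pvNormalizeFilename (String.ofList s) else "")
      = String.ofList (s.map (fun c => if c = ' ' then '_' else c)) := by
  by_cases h0 : s = []
  · subst h0; simp
  · have hne : String.ofList s ≠ "" := fun h => h0 ((ofList_eq_empty_iff s).mp h)
    rw [if_pos hne]
    unfold pvNormalizeFilename
    rw [if_neg hne]
    simp only [PySem.Str.replace]
    have h1 : (String.ofList s).toList = s := by simp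
    rw [h1, show (" " : String).toList = [' '] from rfl, show ("_" : String).toList = ['_'] from rfl,
      repl_single]
    have h2 : (String.ofList (s.map (fun c => if c = ' ' then '_' else c))).toList
        = s.map (fun c => if c = ' ' then '_' else c) := by simp
    rw [h2, show ("/" : String).toList = ['/'] from rfl, show ("∕" : String).toList = ['∕'] from rfl,
      repl_single]
    congr 1
    have : ∀ c ∈ s.map (fun c => if c = ' ' then '_' else c), c ≠ '/' := by
      intro c hc
      rcases List.mem_map.mp hc with ⟨d, hd, rfl⟩
      split_ifs with h
      · decide
      · exact fun e => hs (e ▸ hd)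
    calc (s.map (fun c => if c = ' ' then '_' else c)).map (fun c => if c = '/' then '∕' else c)
        = (s.map (fun c => if c = ' ' then '_' else c)).map id := by
          apply List.map_congr_left
          intro c hc
          simp [if_neg (this c hc)]
      _ = _ := by simp

-- ===== VERDICT (by name: the statement is the Claim_ definition above) =====
theorem normalize_path_segments_spec : Claim_equal_normalize_path_segments := by
  intro path _
  unfold Spec_normalize_path_segments normalize_path_segments normalize_path_segments_alt
  by_cases hp : path = ""
  · subst hp; decide
  · rw [if_neg hp]
    simp only
    rw [show ("/" : String).toList = ['/'] from rfl, splitOn_single]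
    rw [foldl_app_map, List.nil_append, List.map_map]
    have hseg : ((splitC '/' path.toList).map
        ((fun x => if x ≠ "" then pvNormalizeFilename x else "") ∘ String.ofList))
        = (splitC '/' path.toList).map
          (fun s => String.ofList (s.map (fun c => if c = ' ' then '_' else c))) := by
      apply List.map_congr_left
      intro s hs
      exact seg_value s (not_mem_splitC '/' path.toList s hs)
    rw [hseg]
    simp only [PySem.Str.join, List.map_map]
    have hlists : ((splitC '/' path.toList).map
        (String.toList ∘ fun s => String.ofList (s.map (fun c => if c = ' ' then '_' else c))))
        = (splitC '/' path.toList).map (List.map (fun c => if c = ' ' then '_' else c)) := by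
      apply List.map_congr_left
      intro s _
      simp
    rw [hlists, show ("/" : String).toList = ['/'] from rfl,
      join_map_splitC '/' _ (by decide) path.toList]
    simp [PySem.Str.replace, repl_single]
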